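-- pv_equiv track=rewrite | github.com/breatrice321/A-Mean | stl-10-FI/process_stl10_result_av_mis_normalized.py | get_statistics_without_fault_injection
-- ===== SOURCE A (Python) =====
-- super_label_map = {
--     0: "airplane",
--     1: "bird",
--     2: "car",
--     3: "cat",
--     4: "deer",
--     5: "dog",
--     6: "horse",
--     7: "monkey",
--     8: "ship",
--     9: "truck"
-- }
--
-- def find_avmis(main_class, predicted_class):
--     type1_super_groups = ['car', 'deer', 'horse', 'truck']
--     type2_super_groups = ['airplane', 'bird', 'cat', 'dog', 'monkey', 'ship']
--     main_super_label = super_label_map[main_class]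
--     predicted_super_label = super_label_map[predicted_class]
--
--     if main_super_label != predicted_super_label:
--         if main_super_label in type1_super_groups and predicted_super_label in type1_super_groups:
--             return True
--         elif main_super_label in type1_super_groups and predicted_super_label in type2_super_groups:
--             return True
--         else:
--             return False
--     else:
--         return False
--
-- def get_statistics_without_fault_injection(original_label_list, predicted_label_list):
--     correct_classification = 0
--     misclassified_avmis = 0
--     misclassified_non_avmis = 0
--     correct_indices = []
--     avmis_indexes = []
--     non_avmis_indexes = []
--     for i in range(len(original_label_list)):
--         org_val = original_label_list[i]
--         pred_val = predicted_label_list[i]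
--         if org_val != pred_val:
--             if find_avmis(org_val, pred_val):
--                 misclassified_avmis += 1
--                 avmis_indexes.append(i)
--             else:
--                 misclassified_non_avmis += 1
--                 non_avmis_indexes.append(i)
--         else:
--             correct_classification += 1
--             correct_indices.append(i)
--     return correct_indices, avmis_indexes, non_avmis_indexes, correct_classification, misclassified_avmis, misclassified_non_avmis
-- ===== SOURCE B (Python) =====
-- def get_statistics_without_fault_injection(original_label_list, predicted_label_list):
--     # type1 super-group label indices: car, deer, horse, truck
--     TYPE1 = {2, 4, 6, 9}
--     pairs = [(i, original_label_list[i], predicted_label_list[i])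
--              for i in range(len(original_label_list))]
--     correct_indices = [i for i, o, p in pairs if o == p]
--     avmis_indexes = [i for i, o, p in pairs if o != p and o in TYPE1]
--     non_avmis_indexes = [i for i, o, p in pairs if o != p and o not in TYPE1]
--     return (correct_indices, avmis_indexes, non_avmis_indexes,
--             len(correct_indices), len(avmis_indexes), len(non_avmis_indexes))
-- ===== Notes on version B (the rewrite author's own statement) =====
-- stated objective: simpler
-- what changed: Replaces the single index-driven partitioning loop with dict lookups and super-group name lists by three filtered comprehensions over the indexed pairs, using the predicate 'labels differ and the original label is in {2,4,6,9}' (the type1 indices) instead of find_avmis, with the counts derived as len() of each list.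
import Mathlib
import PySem

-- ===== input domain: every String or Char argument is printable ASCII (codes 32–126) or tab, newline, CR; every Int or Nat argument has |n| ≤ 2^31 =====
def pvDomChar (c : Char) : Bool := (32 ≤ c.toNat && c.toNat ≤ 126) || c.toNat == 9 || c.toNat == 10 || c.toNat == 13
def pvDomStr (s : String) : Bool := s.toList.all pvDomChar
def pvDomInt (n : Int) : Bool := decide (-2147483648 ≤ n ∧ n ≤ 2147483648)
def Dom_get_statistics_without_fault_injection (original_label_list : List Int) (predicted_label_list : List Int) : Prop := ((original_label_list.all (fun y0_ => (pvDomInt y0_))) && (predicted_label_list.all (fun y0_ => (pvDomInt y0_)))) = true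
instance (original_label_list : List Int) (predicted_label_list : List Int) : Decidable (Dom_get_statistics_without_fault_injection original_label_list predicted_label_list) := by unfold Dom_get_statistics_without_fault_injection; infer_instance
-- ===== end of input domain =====

-- B replaces the single index-driven partitioning loop (dict lookups + super-group name
-- lists) by three filtered passes over the indexed pairs with the numeric predicate
-- 'labels differ and the original is in {2,4,6,9}', counts derived as lengths (objective: simpler).

-- ===== PORT A =====
def super_label_map : PySem.Dict Int String :=
  PySem.Dict.ofList [(0, "airplane"), (1, "bird"), (2, "car"), (3, "cat"), (4, "deer"),
                     (5, "dog"), (6, "horse"), (7, "monkey"), (8, "ship"), (9, "truck")]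

-- super_label_map[c] raises KeyError for c outside 0..9; those inputs are excluded by
-- Pre_; the `getD ""` default is never reached inside Pre_.
def find_avmis (main_class : Int) (predicted_class : Int) : Bool :=
  let type1_super_groups : List String := ["car", "deer", "horse", "truck"]
  let type2_super_groups : List String := ["airplane", "bird", "cat", "dog", "monkey", "ship"]
  let main_super_label := (super_label_map.get? main_class).getD ""
  let predicted_super_label := (super_label_map.get? predicted_class).getD ""
  if main_super_label ≠ predicted_super_label then
    if type1_super_groups.contains main_super_label && type1_super_groups.contains predicted_super_label then
      true
    else if type1_super_groups.contains main_super_label && type2_super_groups.contains predicted_super_label then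
      true
    else
      false
  else
    false

def get_statistics_without_fault_injection (original_label_list : List Int) (predicted_label_list : List Int) : List Int × List Int × List Int × Int × Int × Int :=
  (PySem.List.pyRange 0 original_label_list.length 1).foldl
    (fun st i =>
      match st with
      | (correct_indices, avmis_indexes, non_avmis_indexes, correct_classification, misclassified_avmis, misclassified_non_avmis) =>
        let org_val := PySem.List.pyGetD original_label_list i 0
        let pred_val := PySem.List.pyGetD predicted_label_list i 0
        if org_val ≠ pred_val then
          if find_avmis org_val pred_val then
            (correct_indices, avmis_indexes ++ [i], non_avmis_indexes, correct_classification, misclassified_avmis + 1, misclassified_non_avmis)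
          else
            (correct_indices, avmis_indexes, non_avmis_indexes ++ [i], correct_classification, misclassified_avmis, misclassified_non_avmis + 1)
        else
          (correct_indices ++ [i], avmis_indexes, non_avmis_indexes, correct_classification + 1, misclassified_avmis, misclassified_non_avmis))
    ([], [], [], 0, 0, 0)

-- ===== PORT B =====
-- the list indexing raises IndexError on a too-short predicted list, as in Source B; the
-- `pyGetD … 0` default is unreachable inside Pre_.
def get_statistics_without_fault_injection_alt (original_label_list : List Int) (predicted_label_list : List Int) : List Int × List Int × List Int × Int × Int × Int :=
  let type1 : List Int := [2, 4, 6, 9]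
  let pairs := (PySem.List.pyRange 0 original_label_list.length 1).map
    (fun i => (i, PySem.List.pyGetD original_label_list i 0, PySem.List.pyGetD predicted_label_list i 0))
  let correct_indices := (pairs.filter (fun x => x.2.1 == x.2.2)).map (·.1)
  let avmis_indexes := (pairs.filter (fun x => x.2.1 != x.2.2 && type1.contains x.2.1)).map (·.1)
  let non_avmis_indexes := (pairs.filter (fun x => x.2.1 != x.2.2 && !type1.contains x.2.1)).map (·.1)
  (correct_indices, avmis_indexes, non_avmis_indexes,
   (correct_indices.length : Int), (avmis_indexes.length : Int), (non_avmis_indexes.length : Int))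

-- ===== PRECONDITION & SPEC =====
-- Pre_ excludes exactly the inputs on which A raises: a predicted list shorter than the
-- original list (IndexError at i = len(predicted)), and any compared pair that differs
-- with either label outside 0..9 (KeyError in super_label_map). B raises IndexError on
-- the former too; outside Pre_ nothing is claimed.
def Pre_get_statistics_without_fault_injection (original_label_list : List Int) (predicted_label_list : List Int) : Prop :=
  original_label_list.length ≤ predicted_label_list.length ∧
  ∀ x ∈ original_label_list.zip predicted_label_list,
    x.1 = x.2 ∨ (0 ≤ x.1 ∧ x.1 ≤ 9 ∧ 0 ≤ x.2 ∧ x.2 ≤ 9)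
instance (original_label_list : List Int) (predicted_label_list : List Int) : Decidable (Pre_get_statistics_without_fault_injection original_label_list predicted_label_list) := by unfold Pre_get_statistics_without_fault_injection; infer_instance
def pvWitness_get_statistics_without_fault_injection : List Int × List Int := ([2, 3, 5], [3, 3, 7])

def Spec_get_statistics_without_fault_injection (original_label_list : List Int) (predicted_label_list : List Int) (out : List Int × List Int × List Int × Int × Int × Int) : Prop := out = get_statistics_without_fault_injection_alt original_label_list predicted_label_list
instance (original_label_list : List Int) (predicted_label_list : List Int) (out : List Int × List Int × List Int × Int × Int × Int) : Decidable (Spec_get_statistics_without_fault_injection original_label_list predicted_label_list out) := by unfold Spec_get_statistics_without_fault_injection; infer_instance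

-- ===== CLAIM (what is proved, stated in full; the proofs are below) =====
def Claim_equal_get_statistics_without_fault_injection : Prop := ∀ (original_label_list : List Int) (predicted_label_list : List Int), Dom_get_statistics_without_fault_injection original_label_list predicted_label_list → Pre_get_statistics_without_fault_injection original_label_list predicted_label_list → Spec_get_statistics_without_fault_injection original_label_list predicted_label_list (get_statistics_without_fault_injection original_label_list predicted_label_list)

-- ===== LEMMAS AND PROOFS =====

-- proof-only helper: A's loop body after replacing find_avmis by the numeric type1 test,
-- acting on an indexed pair (i, org, pred).
def pvStepNum (st : List Int × List Int × List Int × Int × Int × Int) (x : Int × Int × Int) : List Int × List Int × List Int × Int × Int × Int :=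
  match st with
  | (ci, ai, ni, cc, ma, mn) =>
    if x.2.1 ≠ x.2.2 then
      if ([2, 4, 6, 9] : List Int).contains x.2.1 then (ci, ai ++ [x.1], ni, cc, ma + 1, mn)
      else (ci, ai, ni ++ [x.1], cc, ma, mn + 1)
    else (ci ++ [x.1], ai, ni, cc + 1, ma, mn)

-- Inside Pre_'s bounds, A's find_avmis is the numeric type1 test B uses.
lemma find_avmis_eq (a b : Int) (ha0 : 0 ≤ a) (ha9 : a ≤ 9) (hb0 : 0 ≤ b) (hb9 : b ≤ 9)
    (hne : a ≠ b) : find_avmis a b = ([2, 4, 6, 9] : List Int).contains a := by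
  interval_cases a <;> interval_cases b <;> first | rfl | decide | simp_all

-- the numeric partitioning fold equals B's three filters with derived counts
lemma foldl_partition (l : List (Int × Int × Int)) (ci ai ni : List Int) (cc ma mn : Int) :
    l.foldl pvStepNum (ci, ai, ni, cc, ma, mn)
    = (ci ++ (l.filter (fun x => x.2.1 == x.2.2)).map (·.1),
       ai ++ (l.filter (fun x => x.2.1 != x.2.2 && ([2, 4, 6, 9] : List Int).contains x.2.1)).map (·.1),
       ni ++ (l.filter (fun x => x.2.1 != x.2.2 && !(([2, 4, 6, 9] : List Int).contains x.2.1))).map (·.1),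
       cc + ((l.filter (fun x => x.2.1 == x.2.2)).length : Int),
       ma + ((l.filter (fun x => x.2.1 != x.2.2 && ([2, 4, 6, 9] : List Int).contains x.2.1)).length : Int),
       mn + ((l.filter (fun x => x.2.1 != x.2.2 && !(([2, 4, 6, 9] : List Int).contains x.2.1))).length : Int)) := by
  induction l generalizing ci ai ni cc ma mn with
  | nil => simp
  | cons x xs ih =>
    by_cases h1 : x.2.1 = x.2.2
    · simp [pvStepNum, h1, ih, List.filter_cons]
      push_cast
      ring
    · by_cases h2 : x.2.1 = 2 ∨ x.2.1 = 4 ∨ x.2.1 = 6 ∨ x.2.1 = 9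
      · have hx : ¬(¬x.2.1 = 2 ∧ ¬x.2.1 = 4 ∧ ¬x.2.1 = 6 ∧ ¬x.2.1 = 9) := by tauto
        simp [pvStepNum, h1, h2, hx, ih, List.filter_cons, List.contains_eq_mem]
        push_cast
        ring
      · have hx : ¬x.2.1 = 2 ∧ ¬x.2.1 = 4 ∧ ¬x.2.1 = 6 ∧ ¬x.2.1 = 9 := by tauto
        simp [pvStepNum, h1, h2, hx, ih, List.filter_cons, List.contains_eq_mem, not_or]
        push_cast
        ring

-- ===== VERDICT (by name: the statement is the Claim_ definition above) =====
theorem get_statistics_without_fault_injection_spec : Claim_equal_get_statistics_without_fault_injection := by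
  intro o p _ hpre
  obtain ⟨hlen, hmem⟩ := hpre
  unfold Spec_get_statistics_without_fault_injection
  have h1 : get_statistics_without_fault_injection o p
      = ((PySem.List.pyRange 0 o.length 1).map
          (fun i => (i, PySem.List.pyGetD o i 0, PySem.List.pyGetD p i 0))).foldl
          pvStepNum ([], [], [], 0, 0, 0) := by
    rw [List.foldl_map]
    unfold get_statistics_without_fault_injection
    apply PySem.List.foldl_congr_mem
    intro st j hj
    obtain ⟨hj0, hjn⟩ := PySem.List.mem_pyRange_one.mp hj
    have hjp : j < (p.length : Int) := by push_cast at hjn ⊢; omega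
    have e1 : PySem.List.pyGetD o j 0 = o[j.toNat]'(by omega) :=
      PySem.List.pyGetD_eq_getElem o 0 hj0 hjn
    have e2 : PySem.List.pyGetD p j 0 = p[j.toNat]'(by push_cast at hjp; omega) :=
      PySem.List.pyGetD_eq_getElem p 0 hj0 hjp
    obtain ⟨ci, ai, ni, cc, ma, mn⟩ := st
    simp only [pvStepNum, e1, e2]
    by_cases hq : o[j.toNat]'(by omega) = p[j.toNat]'(by push_cast at hjp; omega)
    · simp [hq]
    · have hmemx : (o[j.toNat]'(by omega), p[j.toNat]'(by push_cast at hjp; omega)) ∈ o.zip p := by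
        have : (o.zip p)[j.toNat]'(by simp [List.length_zip]; omega)
            = (o[j.toNat]'(by omega), p[j.toNat]'(by push_cast at hjp; omega)) := by simp
        rw [← this]; exact List.getElem_mem _
      rcases hmem _ hmemx with h | ⟨b1, b2, b3, b4⟩
      · exact absurd h hq
      · rw [find_avmis_eq _ _ b1 b2 b3 b4 hq]
  rw [h1, foldl_partition]
  unfold get_statistics_without_fault_injection_alt
  simp
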